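-- pv_equiv track=rewrite | github.com/amanimran786/jarvis-ai | jarvis_core_brain.py | _read_section
-- ===== SOURCE A (Python) =====
-- def _read_section(lines: list[str], heading: str, max_chars: int) -> str:
--     """Extract lines under `heading` until the next same-level heading."""
--     level = heading.count("#")
--     marker = "#" * level + " "
--     in_section = False
--     buf: list[str] = []
--     for line in lines:
--         if line.startswith(heading):
--             in_section = True
--             continue
--         if in_section:
--             # Stop at any heading of the same or higher level
--             if line.startswith(marker) and not line.startswith(heading):
--                 break
--             buf.append(line)
--     text = "\n".join(buf).strip()
--     return text[:max_chars] if len(text) > max_chars else text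
-- ===== SOURCE B (Python) =====
-- def _read_section(lines: list[str], heading: str, max_chars: int) -> str:
--     """Extract lines under `heading` until the next same-level heading."""
--     level = heading.count("#")
--     marker = "#" * level + " "
--     start = next((i for i, l in enumerate(lines) if l.startswith(heading)), None)
--     if start is None:
--         return ""
--     rest = lines[start + 1:]
--     stop = next((j for j, l in enumerate(rest)
--                  if l.startswith(marker) and not l.startswith(heading)), len(rest))
--     body = [l for l in rest[:stop] if not l.startswith(heading)]
--     text = "\n".join(body).strip()
--     return text[:max_chars] if len(text) > max_chars else text
-- ===== Notes on version B (the rewrite author's own statement) =====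
-- stated objective: alternative
-- what changed: Replaced the stateful flag-and-accumulator single pass (in_section/buf with continue/break) by a locate-boundaries-then-slice decomposition: find the first heading line, find the stop line after it, take that slice, filter out interior heading lines, then join/strip/truncate.
import Mathlib
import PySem

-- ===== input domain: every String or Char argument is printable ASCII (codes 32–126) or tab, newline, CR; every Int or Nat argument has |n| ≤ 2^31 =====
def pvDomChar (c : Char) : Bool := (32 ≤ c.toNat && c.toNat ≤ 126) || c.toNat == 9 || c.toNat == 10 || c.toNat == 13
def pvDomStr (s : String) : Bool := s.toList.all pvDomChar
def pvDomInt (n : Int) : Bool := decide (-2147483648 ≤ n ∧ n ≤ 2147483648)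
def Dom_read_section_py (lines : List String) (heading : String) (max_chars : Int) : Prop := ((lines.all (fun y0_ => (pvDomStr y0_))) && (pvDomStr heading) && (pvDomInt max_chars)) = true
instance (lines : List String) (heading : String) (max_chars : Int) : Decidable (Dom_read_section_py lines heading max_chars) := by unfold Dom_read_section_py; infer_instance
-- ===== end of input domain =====

-- B replaces A's flag-based single pass by a locate-boundaries-then-slice decomposition
-- (find the heading index, find the stop index, slice + filter); same return value, similar cost.


-- ===== PORT A =====
-- A's for-loop with `continue`/`break`: structural recursion on lines over (in_section, buf).
def readSectionLoopA (heading marker : String) : List String → Bool → List String → List String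
  | [], _, buf => buf
  | l :: ls, in_section, buf =>
    if PySem.Str.startswith l heading then
      readSectionLoopA heading marker ls true buf
    else if in_section then
      (if PySem.Str.startswith l marker && !PySem.Str.startswith l heading then buf
       else readSectionLoopA heading marker ls in_section (buf ++ [l]))
    else readSectionLoopA heading marker ls in_section buf

def read_section_py (lines : List String) (heading : String) (max_chars : Int) : String :=
  let level := PySem.Str.count heading "#"
  -- "#" * level + " " ported by hand (string repetition has no PySem primitive); exact for level ≥ 0
  let marker := String.ofList (List.replicate level '#' ++ [' '])
  let buf := readSectionLoopA heading marker lines false []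
  let text := PySem.Str.strip (PySem.Str.join "\n" buf)
  if PySem.Str.len text > max_chars then PySem.Str.slice text none (some max_chars) else text

-- ===== PORT B =====
def read_section_py_alt (lines : List String) (heading : String) (max_chars : Int) : String :=
  let level := PySem.Str.count heading "#"
  let marker := String.ofList (List.replicate level '#' ++ [' '])
  match lines.findIdx? (fun l => PySem.Str.startswith l heading) with
  | none => ""
  | some start =>
    let rest := lines.drop (start + 1)   -- lines[start+1:], start+1 ≥ 0
    let stop := (rest.findIdx? (fun l =>
        PySem.Str.startswith l marker && !PySem.Str.startswith l heading)).getD rest.length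
    let body := (rest.take stop).filter (fun l => !PySem.Str.startswith l heading)
    let text := PySem.Str.strip (PySem.Str.join "\n" body)
    if PySem.Str.len text > max_chars then PySem.Str.slice text none (some max_chars) else text

-- ===== PRECONDITION & SPEC =====
def Spec_read_section_py (lines : List String) (heading : String) (max_chars : Int) (out : String) : Prop := out = read_section_py_alt lines heading max_chars
instance (lines : List String) (heading : String) (max_chars : Int) (out : String) : Decidable (Spec_read_section_py lines heading max_chars out) := by unfold Spec_read_section_py; infer_instance

-- ===== CLAIM (what is proved, stated in full; the proofs are below) =====
def Claim_equal_read_section_py : Prop := ∀ (lines : List String) (heading : String) (max_chars : Int), Dom_read_section_py lines heading max_chars → Spec_read_section_py lines heading max_chars (read_section_py lines heading max_chars)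

-- ===== LEMMAS AND PROOFS =====

-- generic form of A's loop, with abstract start predicate p and stop predicate s
def genLoop (p s : String → Bool) : List String → Bool → List String → List String
  | [], _, buf => buf
  | l :: ls, in_section, buf =>
    if p l then genLoop p s ls true buf
    else if in_section then
      (if s l then buf else genLoop p s ls in_section (buf ++ [l]))
    else genLoop p s ls in_section buf

theorem readSectionLoopA_eq_genLoop (heading marker : String) (ls : List String)
    (ins : Bool) (buf : List String) :
    readSectionLoopA heading marker ls ins buf =
      genLoop (fun l => PySem.Str.startswith l heading)
        (fun l => PySem.Str.startswith l marker && !PySem.Str.startswith l heading) ls ins buf := by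
  induction ls generalizing ins buf with
  | nil => rfl
  | cons l ls ih => simp only [readSectionLoopA, genLoop, ih]

theorem genLoop_append (p s : String → Bool) (ls : List String) (ins : Bool) (buf : List String) :
    genLoop p s ls ins buf = buf ++ genLoop p s ls ins [] := by
  induction ls generalizing ins buf with
  | nil => simp [genLoop]
  | cons l ls ih =>
    simp only [genLoop]
    split_ifs with h1 h2 h3
    · rw [ih true buf, ih true []]
    · simp
    · rw [ih ins (buf ++ [l]), ih ins ([] ++ [l])]; simp
    · rw [ih ins buf, ih ins []]

theorem genLoop_true (p s : String → Bool) (hps : ∀ l, p l = true → s l = false)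
    (ls : List String) :
    genLoop p s ls true [] =
      (ls.take ((ls.findIdx? s).getD ls.length)).filter (fun l => !p l) := by
  induction ls with
  | nil => simp [genLoop]
  | cons l ls ih =>
    simp only [genLoop, List.findIdx?_cons]
    by_cases h1 : p l
    · have hs := hps l h1
      simp only [h1, if_true, hs, Bool.false_eq_true]
      rw [ih]
      cases hf : ls.findIdx? s with
      | none => simp [h1]
      | some j => simp [h1]
    · simp only [h1, Bool.false_eq_true, if_false, if_true]
      by_cases h2 : s l
      · simp [h2]
      · simp only [h2, Bool.false_eq_true, if_false]
        rw [genLoop_append, ih]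
        cases hf : ls.findIdx? s with
        | none => simp [h1]
        | some j => simp [h1]

theorem genLoop_false_none (p s : String → Bool) (ls : List String)
    (h : ls.findIdx? p = none) :
    genLoop p s ls false [] = [] := by
  induction ls with
  | nil => rfl
  | cons l ls ih =>
    rw [List.findIdx?_cons] at h
    by_cases h1 : p l
    · simp [h1] at h
    · simp only [h1, Bool.false_eq_true, if_false] at h
      simp only [genLoop, h1, Bool.false_eq_true, if_false]
      exact ih (by cases hf : ls.findIdx? p <;> simp [hf] at h ⊢)

theorem genLoop_false_some (p s : String → Bool) (ls : List String) (i : Nat)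
    (h : ls.findIdx? p = some i) :
    genLoop p s ls false [] = genLoop p s (ls.drop (i + 1)) true [] := by
  induction ls generalizing i with
  | nil => simp at h
  | cons l ls ih =>
    rw [List.findIdx?_cons] at h
    by_cases h1 : p l
    · simp only [h1, if_true] at h
      cases h
      simp [genLoop, h1]
    · simp only [h1, Bool.false_eq_true, if_false] at h
      cases hf : ls.findIdx? p with
      | none => rw [hf] at h; simp at h
      | some j =>
        rw [hf] at h
        simp only [Option.map_some, Option.some.injEq] at h
        subst h
        simp only [genLoop, h1, Bool.false_eq_true, if_false, List.drop_succ_cons]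
        exact ih j hf


-- ===== VERDICT (by name: the statement is the Claim_ definition above) =====
theorem read_section_py_spec : Claim_equal_read_section_py := by
  intro lines heading max_chars _
  unfold Spec_read_section_py
  simp only [read_section_py, read_section_py_alt, readSectionLoopA_eq_genLoop]
  cases hf : lines.findIdx? (fun l => PySem.Str.startswith l heading) with
  | none =>
    rw [genLoop_false_none _ _ _ hf]
    have hj : PySem.Str.strip (PySem.Str.join "\n" ([] : List String)) = "" := by decide
    rw [hj]
    have hl : PySem.Str.len "" = 0 := by decide
    rw [hl]
    split_ifs with h
    · have ht : (PySem.Str.slice "" none (some max_chars)).toList = [] := by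
        simp [PySem.Str.toList_slice, PySem.List.slice]
      have h2 := congrArg String.ofList ht
      rwa [String.ofList_toList] at h2
    · rfl
  | some i =>
    rw [genLoop_false_some _ _ _ _ hf,
      genLoop_true _ _ (fun l h => by simp only [h, Bool.not_true, Bool.and_false])]
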